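-- pv_equiv track=rewrite | github.com/duyquang6/algo-practice | dp/longest_subseq_diff_adj_one.py | memoi
-- ===== SOURCE A (Python) =====
-- def memoi(arr):
--     from functools import lru_cache
--
--     @lru_cache(None)
--     def helper(n):
--         if n == 0:
--             return 1
--         res = 0
--         adj = {arr[n] + 1, arr[n] - 1}
--         for i in range(n - 1, -1, -1):
--             if arr[i] in adj:
--                 res = max(helper(i) + 1, res)
--         return res
--
--     return helper(len(arr) - 1)
-- ===== SOURCE B (Python) =====
-- def memoi(arr):
--     # One left-to-right pass: best[v] = best chain length ending at an already-seen
--     # index holding value v; f = chain length ending at the current index.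
--     best = {}
--     f = 0
--     for idx, v in enumerate(arr):
--         if idx == 0:
--             f = 1
--         else:
--             f = max(best.get(v - 1, -1), best.get(v + 1, -1)) + 1
--         if best.get(v, -1) < f:
--             best[v] = f
--     return f
-- ===== Notes on version B (the rewrite author's own statement) =====
-- stated objective: alternative
-- what changed: Replaces the memoized recursion whose inner loop rescans all earlier indices by a single left-to-right pass keeping a dict value->best chain length; same cost on typical inputs, no quadratic rescans in the worst case.
import Mathlib
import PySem

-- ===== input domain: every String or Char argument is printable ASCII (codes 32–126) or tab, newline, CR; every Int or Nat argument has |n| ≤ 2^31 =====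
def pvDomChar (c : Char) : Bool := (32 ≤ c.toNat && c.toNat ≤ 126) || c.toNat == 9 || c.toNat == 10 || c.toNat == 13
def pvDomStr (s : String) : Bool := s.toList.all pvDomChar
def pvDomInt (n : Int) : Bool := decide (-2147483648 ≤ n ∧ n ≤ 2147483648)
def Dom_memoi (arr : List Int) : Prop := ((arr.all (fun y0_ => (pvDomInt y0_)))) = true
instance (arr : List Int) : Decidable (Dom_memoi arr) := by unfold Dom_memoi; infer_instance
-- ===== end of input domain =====

-- B: alternative algorithm — a single left-to-right pass with a dict value→best chain length
-- instead of A's memoized recursion with an inner backwards scan over earlier indices.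

-- ===== PORT A =====
-- helper(n): the recursive memoized function; the 'for i in range(n-1,-1,-1)' loop is the
-- foldl over the reversed attached range (attach carries the bound needed for termination).
-- arr[i] is read with getD: every index reached is in range for the inputs Pre_ admits.
def memoiHelper (arr : List Int) : Nat → Int
  | 0 => 1
  | n+1 =>
      let v := arr.getD (n+1) 0
      ((List.range (n+1)).attach.reverse).foldl
        (fun res i =>
          if arr.getD i.1 0 = v + 1 ∨ arr.getD i.1 0 = v - 1
          then max (memoiHelper arr i.1 + 1) res else res) 0
  decreasing_by
    have := List.mem_range.mp i.2; omega

def memoi (arr : List Int) : Int := memoiHelper arr (arr.length - 1)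

-- ===== PORT B =====
-- state = (best : dict, f : last chain length, idx); one fold over the list.
def memoiAltStep (st : PySem.Dict Int Int × Int × Nat) (v : Int) :
    PySem.Dict Int Int × Int × Nat :=
  let best := st.1
  let f := if st.2.2 = 0 then 1
           else max (best.getD (v - 1) (-1)) (best.getD (v + 1) (-1)) + 1
  let best' := if best.getD v (-1) < f then best.insert v f else best
  (best', f, st.2.2 + 1)

def memoi_alt (arr : List Int) : Int :=
  (arr.foldl memoiAltStep (PySem.Dict.empty, 0, 0)).2.1

-- ===== PRECONDITION & SPEC =====
-- Pre_ excludes only the empty list, on which A raises IndexError (helper reads the last element of an empty list).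
def Pre_memoi (arr : List Int) : Prop := arr ≠ []
instance (arr : List Int) : Decidable (Pre_memoi arr) := by unfold Pre_memoi; infer_instance
def pvWitness_memoi : List Int := [1, 2, 3]

def Spec_memoi (arr : List Int) (out : Int) : Prop := out = memoi_alt arr
instance (arr : List Int) (out : Int) : Decidable (Spec_memoi arr out) := by unfold Spec_memoi; infer_instance

-- ===== CLAIM (what is proved, stated in full; the proofs are below) =====
def Claim_equal_memoi : Prop := ∀ (arr : List Int), Dom_memoi arr → Pre_memoi arr → Spec_memoi arr (memoi arr)

-- ===== LEMMAS AND PROOFS =====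

-- maxPrev arr v k = max of memoiHelper arr i over i < k with arr[i] = v, default -1.
def maxPrev (arr : List Int) (v : Int) (k : Nat) : Int :=
  (List.range k).foldl
    (fun m i => if arr.getD i 0 = v then max m (memoiHelper arr i) else m) (-1)

theorem maxPrev_succ (arr : List Int) (v : Int) (k : Nat) :
    maxPrev arr v (k+1) =
      if arr.getD k 0 = v then max (maxPrev arr v k) (memoiHelper arr k)
      else maxPrev arr v k := by
  simp [maxPrev, List.range_succ]

-- the reversed fold of A equals the forward fold (the step is right-commutative)
theorem helper_succ_forward (arr : List Int) (n : Nat) :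
    memoiHelper arr (n+1) =
      (List.range (n+1)).foldl
        (fun res i =>
          if arr.getD i 0 = arr.getD (n+1) 0 + 1 ∨ arr.getD i 0 = arr.getD (n+1) 0 - 1
          then max (memoiHelper arr i + 1) res else res) 0 := by
  have hc : RightCommutative
      (fun (res : Int) (i : {x // x ∈ List.range (n+1)}) =>
        if arr.getD i.1 0 = arr.getD (n+1) 0 + 1 ∨ arr.getD i.1 0 = arr.getD (n+1) 0 - 1
        then max (memoiHelper arr i.1 + 1) res else res) :=
    ⟨by intro b x y; split_ifs <;> omega⟩
  rw [memoiHelper]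
  rw [List.Perm.foldl_eq (List.reverse_perm _) 0,
    List.foldl_attach (f := fun (res : Int) (i : Nat) =>
      if arr.getD i 0 = arr.getD (n+1) 0 + 1 ∨ arr.getD i 0 = arr.getD (n+1) 0 - 1
      then max (memoiHelper arr i + 1) res else res)]

-- characterisation of the forward fold via maxPrev
theorem forward_char (arr : List Int) (v : Int) (k : Nat) :
    (List.range k).foldl
        (fun res i =>
          if arr.getD i 0 = v + 1 ∨ arr.getD i 0 = v - 1
          then max (memoiHelper arr i + 1) res else res) 0 =
      max (maxPrev arr (v - 1) k) (maxPrev arr (v + 1) k) + 1 := by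
  induction k with
  | zero => simp [maxPrev]
  | succ k ih =>
      rw [List.range_succ, List.foldl_append, ih, maxPrev_succ, maxPrev_succ]
      simp only [List.foldl_cons, List.foldl_nil]
      split_ifs <;> omega

-- characterisation of helper(n+1) via maxPrev
theorem helper_succ_char (arr : List Int) (n : Nat) :
    memoiHelper arr (n+1) =
      max (maxPrev arr (arr.getD (n+1) 0 - 1) (n+1))
          (maxPrev arr (arr.getD (n+1) 0 + 1) (n+1)) + 1 :=
  (helper_succ_forward arr n).trans (forward_char arr (arr.getD (n+1) 0) (n+1))

theorem getD_empty_int (v : Int) : (PySem.Dict.empty : PySem.Dict Int Int).getD v (-1) = -1 := by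
  simp [PySem.Dict.getD]

-- B's fold invariant over the prefix of length k
theorem alt_invariant (arr : List Int) (k : Nat) (hk : 1 ≤ k) (hle : k ≤ arr.length) :
    let st := (arr.take k).foldl memoiAltStep (PySem.Dict.empty, 0, 0)
    st.2.2 = k ∧ st.2.1 = memoiHelper arr (k-1) ∧
      ∀ v, st.1.getD v (-1) = maxPrev arr v k := by
  induction k, hk using Nat.le_induction with
  | base =>
      have hlt : 0 < arr.length := by omega
      have h0 : arr.getD 0 0 = arr[0] := by
        simp [List.getD, List.getElem?_eq_getElem hlt]
      have htake : arr.take 1 = [arr[0]] := by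
        rw [List.take_add_one, List.take_zero, List.getElem?_eq_getElem hlt]
        simp
      intro st
      have hstep : memoiAltStep (PySem.Dict.empty, 0, 0) arr[0] =
          (PySem.Dict.empty.insert arr[0] 1, 1, 1) := by
        norm_num [memoiAltStep, getD_empty_int]
      have hst : st = (PySem.Dict.empty.insert arr[0] 1, 1, 1) := by
        simp only [st, htake, List.foldl_cons, List.foldl_nil, hstep]
      have hH0 : memoiHelper arr 0 = 1 := by rw [memoiHelper]
      refine ⟨by rw [hst], by rw [hst, hH0], ?_⟩
      intro v
      rw [hst]
      simp only [PySem.Dict.getD_insert, maxPrev_succ, h0, hH0]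
      simp only [maxPrev, List.range_zero, List.foldl_nil]
      split_ifs with h1 h2 h2
      · omega
      · exact absurd h1.symm h2
      · exact absurd h2.symm h1
      · exact getD_empty_int v
  | succ k hk ih =>
      intro st
      have hlt : k < arr.length := by omega
      have hle' : k ≤ arr.length := by omega
      have h0 : arr.getD k 0 = arr[k] := by
        simp [List.getD, List.getElem?_eq_getElem hlt]
      obtain ⟨hidx, hf, hd⟩ := ih hle'
      have hst : st = memoiAltStep ((arr.take k).foldl memoiAltStep (PySem.Dict.empty, 0, 0)) arr[k] := by
        simp only [st]
        rw [List.take_add_one, List.getElem?_eq_getElem hlt, Option.toList_some,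
          List.foldl_append, List.foldl_cons, List.foldl_nil]
      obtain ⟨m, rfl⟩ : ∃ m, k = m + 1 := ⟨k - 1, by omega⟩
      set stk := (arr.take (m+1)).foldl memoiAltStep (PySem.Dict.empty, 0, 0) with hstk
      have hfv : max (stk.1.getD (arr[m+1] - 1) (-1)) (stk.1.getD (arr[m+1] + 1) (-1)) + 1
          = memoiHelper arr (m+1) := by
        rw [hd, hd, ← h0]
        exact (helper_succ_char arr m).symm
      have hF : memoiAltStep stk arr[m+1] =
          (if stk.1.getD arr[m+1] (-1) < memoiHelper arr (m+1)
             then stk.1.insert arr[m+1] (memoiHelper arr (m+1)) else stk.1,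
           memoiHelper arr (m+1), m+2) := by
        simp only [memoiAltStep, hidx, Nat.succ_ne_zero, if_false, hfv]
      have hm : ∀ v : Int, maxPrev arr v (m+1+1) =
          if arr[m+1] = v then max (maxPrev arr v (m+1)) (memoiHelper arr (m+1))
          else maxPrev arr v (m+1) := by
        intro v; rw [maxPrev_succ, h0]
      refine ⟨by rw [hst, hF], by simp [hst, hF], ?_⟩
      intro v
      rw [hst, hF, hm v]
      dsimp only
      by_cases hins : stk.1.getD arr[m+1] (-1) < memoiHelper arr (m+1)
      · rw [if_pos hins, PySem.Dict.getD_insert]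
        have hlt2 : maxPrev arr arr[m+1] (m+1) < memoiHelper arr (m+1) := by
          rw [← hd]; exact hins
        split_ifs with h1 h2 h2
        · rw [← h1] at hlt2; omega
        · exact absurd h1.symm h2
        · exact absurd h2.symm h1
        · exact hd v
      · rw [if_neg hins, hd v]
        have hge : memoiHelper arr (m+1) ≤ maxPrev arr arr[m+1] (m+1) := by
          rw [← hd]; omega
        split_ifs with h1
        · rw [h1] at hge; omega
        · rfl

-- ===== VERDICT (by name: the statement is the Claim_ definition above) =====
theorem memoi_spec : Claim_equal_memoi := by
  intro arr _ hpre
  have hlen : 1 ≤ arr.length := by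
    cases arr with
    | nil => exact absurd rfl hpre
    | cons a l => simp
  have h := alt_invariant arr arr.length hlen le_rfl
  simp only [List.take_length] at h
  unfold Spec_memoi memoi memoi_alt
  exact h.2.1.symm
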